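-- pv_equiv track=rewrite | github.com/devYuMinKim/Coding_Test_with_JavaScript | 20220810/모범답안/20220810_03.js/inputK.py | solution
-- ===== SOURCE A (Python) =====
-- def solution(N, K):
--     arr = [ s for s in str(N) ];
--     insert = 0
--
--     if N >= 0:
--         for i in range(0, len(arr)):
--             if int(arr[i]) <= K:
--                 arr.insert(i, str(K))
--                 insert = 1
--                 break
--     else:
--         for i in range(1, len(arr)):
--             if int(arr[i]) > K:
--                 arr.insert(i, str(K))
--                 insert = 1
--                 break
--
--     if insert == 0:
--         arr.append(str(K))
--
--     return (int("".join(arr)))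
-- ===== SOURCE B (Python) =====
-- def solution(N, K):
--     s = str(N)
--     if N >= 0:
--         off, base = 0, s
--         wanted = range(0, min(K, 9) + 1)      # the digit symbols d with d <= K
--     else:
--         off, base = 1, s[1:]
--         wanted = range(K + 1, 10)             # the digit symbols d with d > K
--     hits = [p for p in (base.find(str(d)) for d in wanted) if p >= 0]
--     j = off + (min(hits) if hits else len(base))
--     return int(s[:j] + str(K) + s[j:])
-- ===== Notes on version B (the rewrite author's own statement) =====
-- stated objective: alternative
-- what changed: B contains no scan over the digits of N at all: it computes, for each qualifying digit symbol (0..min(K,9) for N>=0, K+1..9 for N<0), the first occurrence of that symbol with str.find, takes the minimum of the found indices (falling back to the end when none occurs) and builds the answer with one slice-concat, instead of A's position-by-position loop over a list of one-character strings with list.insert, break, insert-flag and append fallback.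
import Mathlib
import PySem

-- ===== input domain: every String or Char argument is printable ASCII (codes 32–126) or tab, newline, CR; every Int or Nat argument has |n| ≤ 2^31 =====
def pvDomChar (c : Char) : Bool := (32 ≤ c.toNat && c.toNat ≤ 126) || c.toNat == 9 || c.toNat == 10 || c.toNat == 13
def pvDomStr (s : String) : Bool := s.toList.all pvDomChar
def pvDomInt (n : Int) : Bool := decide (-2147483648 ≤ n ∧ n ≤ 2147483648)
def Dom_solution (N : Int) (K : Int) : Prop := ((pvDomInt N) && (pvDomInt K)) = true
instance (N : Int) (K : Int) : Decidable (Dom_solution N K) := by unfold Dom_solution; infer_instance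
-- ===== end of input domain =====

-- B replaces A's position-by-position scan (list of 1-character strings, list.insert, break,
-- insert-flag, append fallback) by: first occurrence of each qualifying digit symbol via
-- str.find, minimum of the found indices, one slice-concat (objective: alternative, same cost).

-- ===== PORT A =====
-- int(x) on a one-character string, as A applies it to arr[i]; the .getD is never reached
-- on the chars A scans (ASCII digits)
def pvIntOf (s : String) : Int := (PySem.Int.ofStr? s).getD 0

-- 'for i in range(0, len(arr)): if int(arr[i]) <= K: arr.insert(i, str(K)); break'
-- (some = the mutated arr after the break, none = the loop fell through with insert == 0)
def pvLoopPos (K : Int) (ks : String) : List String → Option (List String)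
  | [] => none
  | c :: rest => if pvIntOf c ≤ K then some (ks :: c :: rest) else (pvLoopPos K ks rest).map (c :: ·)

-- 'for i in range(1, len(arr)): if int(arr[i]) > K: arr.insert(i, str(K)); break' (applied to arr's tail)
def pvLoopNeg (K : Int) (ks : String) : List String → Option (List String)
  | [] => none
  | c :: rest => if pvIntOf c > K then some (ks :: c :: rest) else (pvLoopNeg K ks rest).map (c :: ·)

def solution (N : Int) (K : Int) : Int :=
  let arr : List String := (PySem.Int.toChars N).map (fun c => String.ofList [c])  -- [s for s in str(N)]
  let ks := PySem.Int.toStr K                                                      -- str(K)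
  let arr2 : List String :=
    if N ≥ 0 then
      match pvLoopPos K ks arr with
      | some a => a
      | none => arr ++ [ks]           -- 'if insert == 0: arr.append(str(K))'
    else
      match arr with
      | [] => arr ++ [ks]             -- unreachable: str(N) is never empty
      | h :: t =>
        match pvLoopNeg K ks t with
        | some a => h :: a
        | none => arr ++ [ks]
  -- int("".join(arr)); Pre_ excludes K < 0, where Python raises ValueError here
  (PySem.Int.ofChars? (arr2.map String.toList).flatten).getD 0

-- ===== PORT B =====
-- strings are carried as List Char; base.find(str(d)) is PySem.Chars.find on those lists
def solution_alt (N : Int) (K : Int) : Int :=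
  let s : List Char := PySem.Int.toChars N                                         -- str(N)
  let off : Int := if N ≥ 0 then 0 else 1
  let base : List Char := if N ≥ 0 then s else PySem.List.slice s (some 1) none    -- s[1:]
  let wanted : List Int :=
    if N ≥ 0 then PySem.List.pyRange 0 (min K 9 + 1) 1 else PySem.List.pyRange (K + 1) 10 1
  let hits : List Int :=
    (wanted.map (fun d => PySem.Chars.find base (PySem.Int.toChars d))).filter (fun p => decide (p ≥ 0))
  let j : Int := off + (if hits ≠ [] then (PySem.List.min? hits (fun x => x)).getD 0 else (base.length : Int))
  -- int(s[:j] + str(K) + s[j:]); Pre_ excludes K < 0 (ValueError in Python)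
  (PySem.Int.ofChars? (PySem.List.slice s none (some j) ++ PySem.Int.toChars K ++ PySem.List.slice s (some j) none)).getD 0

-- ===== PRECONDITION & SPEC =====
-- For K < 0, str(K) carries a '-' that lands among the digits and the final int() raises
-- ValueError in Python (in A and in B alike); A returns normally on every K ≥ 0.
def Pre_solution (N : Int) (K : Int) : Prop := 0 ≤ K
instance (N : Int) (K : Int) : Decidable (Pre_solution N K) := by unfold Pre_solution; infer_instance

def pvWitness_solution : Int × Int := (472, 5)

def Spec_solution (N : Int) (K : Int) (out : Int) : Prop := out = solution_alt N K
instance (N : Int) (K : Int) (out : Int) : Decidable (Spec_solution N K out) := by unfold Spec_solution; infer_instance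

-- ===== CLAIM (what is proved, stated in full; the proofs are below) =====
def Claim_equal_solution : Prop := ∀ (N : Int) (K : Int), Dom_solution N K → Pre_solution N K → Spec_solution N K (solution N K)

-- ===== LEMMAS AND PROOFS =====

-- A's break-scan, characterized by List.findIdx over the scanned list
theorem pvLoopPos_findIdx (K : Int) (ks : String) (l : List String) :
    pvLoopPos K ks l =
      (if List.findIdx (fun c => decide (pvIntOf c ≤ K)) l < l.length
       then some (l.take (List.findIdx (fun c => decide (pvIntOf c ≤ K)) l) ++
                  ks :: l.drop (List.findIdx (fun c => decide (pvIntOf c ≤ K)) l))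
       else none) := by
  induction l with
  | nil => simp [pvLoopPos]
  | cons c rest ih =>
    simp only [pvLoopPos]
    by_cases hc : pvIntOf c ≤ K
    · rw [if_pos hc, List.findIdx_cons]
      have hcd : decide (pvIntOf c ≤ K) = true := by simpa using hc
      rw [hcd, cond_true]
      simp
    · rw [if_neg hc, ih, List.findIdx_cons]
      have hcd : decide (pvIntOf c ≤ K) = false := by simpa using hc
      rw [hcd, cond_false]
      by_cases hlt : List.findIdx (fun c => decide (pvIntOf c ≤ K)) rest < rest.length
      · rw [if_pos hlt, if_pos (by simp only [List.length_cons]; omega)]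
        simp [List.take_succ_cons, List.drop_succ_cons]
      · rw [if_neg hlt, if_neg (by simp only [List.length_cons]; omega)]
        rfl

theorem pvLoopNeg_findIdx (K : Int) (ks : String) (l : List String) :
    pvLoopNeg K ks l =
      (if List.findIdx (fun c => decide (pvIntOf c > K)) l < l.length
       then some (l.take (List.findIdx (fun c => decide (pvIntOf c > K)) l) ++
                  ks :: l.drop (List.findIdx (fun c => decide (pvIntOf c > K)) l))
       else none) := by
  induction l with
  | nil => simp [pvLoopNeg]
  | cons c rest ih =>
    simp only [pvLoopNeg]
    by_cases hc : pvIntOf c > K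
    · rw [if_pos hc, List.findIdx_cons]
      have hcd : decide (pvIntOf c > K) = true := by simpa using hc
      rw [hcd, cond_true]
      simp
    · rw [if_neg hc, ih, List.findIdx_cons]
      have hcd : decide (pvIntOf c > K) = false := by simpa using hc
      rw [hcd, cond_false]
      by_cases hlt : List.findIdx (fun c => decide (pvIntOf c > K)) rest < rest.length
      · rw [if_pos hlt, if_pos (by simp only [List.length_cons]; omega)]
        simp [List.take_succ_cons, List.drop_succ_cons]
      · rw [if_neg hlt, if_neg (by simp only [List.length_cons]; omega)]
        rfl

theorem findIdx_congr_mem {α : Type} (p q : α → Bool) (l : List α) (h : ∀ x ∈ l, p x = q x) :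
    List.findIdx p l = List.findIdx q l := by
  induction l with
  | nil => rfl
  | cons a t ih =>
    simp only [List.findIdx_cons, h a (by simp)]
    rw [ih (fun x hx => h x (by simp [hx]))]

theorem findIdx_le_of_getElem {α : Type} (p : α → Bool) (l : List α) (i : Nat) (hi : i < l.length)
    (h : p (l[i]'hi) = true) : List.findIdx p l ≤ i := by
  by_contra hlt
  push_neg at hlt
  have hfalse : p (l[i]'hi) = false := List.not_of_lt_findIdx hlt
  exact Bool.false_ne_true (hfalse.symm.trans h)

theorem findIdx_getElem' {α : Type} (p : α → Bool) (l : List α) (h : List.findIdx p l < l.length) :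
    p (l[List.findIdx p l]'h) = true := List.findIdx_getElem

theorem singleton_prefix_iff (a : Char) (t : List Char) : ([a] <+: t) ↔ t.head? = some a := by
  cases t <;> simp [List.cons_prefix_cons, eq_comm]

theorem singleton_infix_iff (a : Char) (cs : List Char) : ([a] <:+: cs) ↔ a ∈ cs := by
  constructor
  · rintro ⟨s, t, h⟩; subst h; simp
  · intro h
    obtain ⟨s, t, h⟩ := List.append_of_mem h
    subst h
    exact ⟨s, t, by simp⟩

-- base.find(str(d)) for a one-character needle = the first index of that character
theorem find_singleton (cs : List Char) (a : Char) :
    PySem.Chars.find cs [a] =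
      (if List.findIdx (fun c => decide (c = a)) cs < cs.length
       then ((List.findIdx (fun c => decide (c = a)) cs : Nat) : Int) else -1) := by
  by_cases hin : [a] <:+: cs
  · have hnn : 0 ≤ PySem.Chars.find cs [a] := (PySem.Chars.find_nonneg_iff cs [a]).mpr hin
    obtain ⟨hpre, hmin⟩ := PySem.Chars.find_spec hnn
    set t := (PySem.Chars.find cs [a]).toNat with ht
    have htlen : t < cs.length := by
      have hle := PySem.Chars.find_le_length cs [a]
      rcases lt_or_eq_of_le hle with h | h
      · omega
      · exfalso
        have : cs.drop t = [] := by
          apply List.drop_eq_nil_of_le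
          omega
        rw [this] at hpre
        simp [List.prefix_nil] at hpre
    have hat : cs[t] = a := by
      have := (singleton_prefix_iff a (cs.drop t)).mp hpre
      rw [List.head?_drop] at this
      have := List.getElem?_eq_getElem htlen ▸ this
      simpa [List.getElem?_eq_getElem htlen] using this
    have hidx : List.findIdx (fun c => decide (c = a)) cs = t := by
      apply le_antisymm
      · exact findIdx_le_of_getElem _ _ t htlen (by simp [hat])
      · by_contra hltc
        push_neg at hltc
        have hilen : List.findIdx (fun c => decide (c = a)) cs < cs.length := by omega
        have hpi := findIdx_getElem' (fun c => decide (c = a)) cs hilen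
        simp only [decide_eq_true_eq] at hpi
        have : [a] <+: cs.drop (List.findIdx (fun c => decide (c = a)) cs) := by
          rw [singleton_prefix_iff, List.head?_drop, List.getElem?_eq_getElem hilen, hpi]
        exact hmin _ hltc this
    rw [hidx, if_pos htlen, ht]
    omega
  · have h1 : PySem.Chars.find cs [a] = -1 := (PySem.Chars.find_eq_neg_one_iff cs [a]).mpr hin
    have h2 : a ∉ cs := fun hmem => hin ((singleton_infix_iff a cs).mpr hmem)
    rw [h1, if_neg]
    intro hlt
    have := List.findIdx_getElem (w := hlt)
    simp only [decide_eq_true_eq] at this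
    exact h2 (this ▸ List.getElem_mem hlt)

-- the heart of B: [p for p in (base.find(str(d)) …) if p >= 0] then min-or-len
-- equals the first index whose character lies in the wanted class
theorem pvHitsVal (cs Q : List Char) (hits : List Int)
    (hh : hits = (Q.map (fun a => PySem.Chars.find cs [a])).filter (fun p => decide (p ≥ 0))) :
    (if hits ≠ [] then (PySem.List.min? hits (fun x => x)).getD 0 else (cs.length : Int))
      = ((List.findIdx (fun c => decide (c ∈ Q)) cs : Nat) : Int) := by
  by_cases hQ : ∃ c ∈ cs, c ∈ Q
  · set F := List.findIdx (fun c => decide (c ∈ Q)) cs with hF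
    have hFlen : F < cs.length := by
      rw [hF, List.findIdx_lt_length]
      obtain ⟨c, hc1, hc2⟩ := hQ
      exact ⟨c, hc1, by simpa using hc2⟩
    have haF : cs[F] ∈ Q := by
      have := findIdx_getElem' (fun c => decide (c ∈ Q)) cs hFlen
      simp only [decide_eq_true_eq] at this
      exact this
    -- the hit produced by the wanted symbol cs[F] is exactly F
    have hfindF : PySem.Chars.find cs [cs[F]] = (F : Int) := by
      rw [find_singleton]
      have hidx : List.findIdx (fun c => decide (c = cs[F]'hFlen)) cs = F := by
        apply le_antisymm
        · exact findIdx_le_of_getElem _ _ F hFlen (by simp)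
        · by_contra hltc
          push_neg at hltc
          have hilen : List.findIdx (fun c => decide (c = cs[F]'hFlen)) cs < cs.length := by omega
          have hpi := findIdx_getElem' (fun c => decide (c = cs[F]'hFlen)) cs hilen
          simp only [decide_eq_true_eq] at hpi
          have hq : decide ((cs[List.findIdx (fun c => decide (c = cs[F]'hFlen)) cs]'hilen) ∈ Q) = true := by
            simp [hpi, haF]
          have := findIdx_le_of_getElem (fun c => decide (c ∈ Q)) cs _ hilen hq
          omega
      rw [hidx, if_pos hFlen]
    have hFin : (F : Int) ∈ hits := by
      rw [hh, List.mem_filter]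
      constructor
      · rw [List.mem_map]
        exact ⟨cs[F], haF, hfindF⟩
      · simp
    have hne : hits ≠ [] := fun h => by simp [h] at hFin
    rw [if_pos hne]
    obtain ⟨m, hm⟩ : ∃ m, PySem.List.min? hits (fun x => x) = some m := by
      cases hmin : PySem.List.min? hits (fun x => x) with
      | none => exact absurd ((PySem.List.min?_eq_none_iff hits _).mp hmin) hne
      | some m => exact ⟨m, rfl⟩
    rw [hm, Option.getD_some]
    -- every hit is ≥ F …
    have hlow : ∀ y ∈ hits, (F : Int) ≤ y := by
      intro y hy
      rw [hh, List.mem_filter] at hy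
      obtain ⟨hy1, hy2⟩ := hy
      rw [List.mem_map] at hy1
      obtain ⟨a, haQ, hfa⟩ := hy1
      simp only [decide_eq_true_eq] at hy2
      rw [find_singleton] at hfa
      by_cases hlt : List.findIdx (fun c => decide (c = a)) cs < cs.length
      · rw [if_pos hlt] at hfa
        have hpi := findIdx_getElem' (fun c => decide (c = a)) cs hlt
        simp only [decide_eq_true_eq] at hpi
        have hq : decide ((cs[List.findIdx (fun c => decide (c = a)) cs]'hlt) ∈ Q) = true := by
          simp [hpi, haQ]
        have := findIdx_le_of_getElem (fun c => decide (c ∈ Q)) cs _ hlt hq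
        omega
      · rw [if_neg hlt] at hfa
        omega
    -- … and F itself is a hit, so the minimum is F
    have h1 := PySem.List.min?_isMin hm (F : Int) hFin
    have h2 := hlow m (PySem.List.min?_mem hm)
    simp only at h1
    omega
  · push_neg at hQ
    have hhits : hits = [] := by
      rw [hh, List.filter_eq_nil_iff]
      intro p hp
      rw [List.mem_map] at hp
      obtain ⟨a, haQ, hfa⟩ := hp
      have hnotmem : a ∉ cs := fun hmem => hQ a hmem haQ
      have : PySem.Chars.find cs [a] = -1 :=
        (PySem.Chars.find_eq_neg_one_iff cs [a]).mpr (fun hinf => hnotmem ((singleton_infix_iff a cs).mp hinf))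
      simp [← hfa, this]
    have hFlen : List.findIdx (fun c => decide (c ∈ Q)) cs = cs.length := by
      have hle := List.findIdx_le_length (p := fun c => decide (c ∈ Q)) (xs := cs)
      rcases lt_or_eq_of_le hle with h | h
      · rw [List.findIdx_lt_length] at h
        obtain ⟨c, hc1, hc2⟩ := h
        exact absurd (by simpa using hc2) (hQ c hc1)
      · exact h
    simp [hhits, hFlen]

-- ===== digits of a Nat: Nat.toDigits characterized position by position =====

theorem toDigits_getElem (m : Nat) :
    ∀ u (hu : u < (Nat.toDigits 10 m).length),
      (Nat.toDigits 10 m)[u] = Nat.digitChar (m / 10 ^ ((Nat.toDigits 10 m).length - 1 - u) % 10) := by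
  induction m using Nat.strong_induction_on with
  | _ m ih =>
    intro u hu
    by_cases hm : m < 10
    · have hds : Nat.toDigits 10 m = [m.digitChar] := Nat.toDigits_of_lt_base hm
      have hlen : (Nat.toDigits 10 m).length = 1 := by rw [hds]; rfl
      have hu0 : u = 0 := by omega
      subst hu0
      simp [hds, Nat.mod_eq_of_lt hm]
    · have h10 : 10 ≤ m := by omega
      have hds : Nat.toDigits 10 m = Nat.toDigits 10 (m / 10) ++ [(m % 10).digitChar] :=
        Nat.toDigits_of_base_le (by norm_num) h10
      have hlt : m / 10 < m := Nat.div_lt_self (by omega) (by norm_num)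
      have hlen : (Nat.toDigits 10 m).length = (Nat.toDigits 10 (m / 10)).length + 1 := by
        rw [hds]; simp
      by_cases huL : u < (Nat.toDigits 10 (m / 10)).length
      · have : (Nat.toDigits 10 m)[u] = (Nat.toDigits 10 (m / 10))[u] := by
          simp [hds, List.getElem_append_left huL]
        rw [this, ih (m / 10) hlt u huL, hlen]
        have he : (Nat.toDigits 10 (m / 10)).length + 1 - 1 - u
             = ((Nat.toDigits 10 (m / 10)).length - 1 - u) + 1 := by omega
        rw [he]
        congr 2
        rw [Nat.div_div_eq_div_mul, pow_succ]
        ring_nf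
      · have hu2 : u = (Nat.toDigits 10 (m / 10)).length := by omega
        subst hu2
        have : (Nat.toDigits 10 m)[(Nat.toDigits 10 (m / 10)).length]'hu = (m % 10).digitChar := by
          simp [hds]
        rw [this, hlen]
        simp

-- every char of str(|N|) is a decimal digit char
theorem toDigits_mem_digitChar (m : Nat) (c : Char) (hc : c ∈ Nat.toDigits 10 m) :
    ∃ v, v < 10 ∧ c = Nat.digitChar v := by
  obtain ⟨u, hu, hgu⟩ := List.mem_iff_getElem.mp hc
  exact ⟨m / 10 ^ ((Nat.toDigits 10 m).length - 1 - u) % 10, Nat.mod_lt _ (by norm_num),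
    hgu ▸ toDigits_getElem m u hu⟩

-- int('d') for a decimal digit character
theorem pvIntOf_digitChar (d : Nat) (h : d < 10) :
    pvIntOf (String.ofList [Nat.digitChar d]) = (d : Int) := by
  interval_cases d <;> decide

theorem digitChar_inj (v w : Nat) (hv : v < 10) (hw : w < 10)
    (h : Nat.digitChar v = Nat.digitChar w) : v = w := by
  revert h
  interval_cases v <;> interval_cases w <;> decide

-- str(d) for a single-digit nonnegative d
theorem toChars_single (d : Int) (h0 : 0 ≤ d) (h9 : d < 10) :
    PySem.Int.toChars d = [Nat.digitChar d.toNat] := by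
  rw [PySem.Int.toChars, if_neg (by omega)]
  exact Nat.toDigits_of_lt_base (by omega)

-- membership in the wanted symbol class, positive branch: digit v qualifies iff v ≤ K
theorem mem_wanted_pos (K : Int) (hK : 0 ≤ K) (v : Nat) (hv : v < 10) :
    (Nat.digitChar v ∈ (PySem.List.pyRange 0 (min K 9 + 1) 1).map (fun d => Nat.digitChar d.toNat))
      ↔ ((v : Int) ≤ K) := by
  rw [List.mem_map]
  constructor
  · rintro ⟨d, hd, heq⟩
    rw [PySem.List.mem_pyRange_one] at hd
    have hd10 : d.toNat < 10 := by omega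
    have := digitChar_inj d.toNat v hd10 hv heq
    omega
  · intro hvK
    refine ⟨(v : Int), ?_, by simp⟩
    rw [PySem.List.mem_pyRange_one]
    omega

-- membership in the wanted symbol class, negative branch: digit v qualifies iff v > K
theorem mem_wanted_neg (K : Int) (v : Nat) (hv : v < 10) :
    (Nat.digitChar v ∈ (PySem.List.pyRange (K + 1) 10 1).map (fun d => Nat.digitChar d.toNat))
      ↔ (K < (v : Int)) := by
  rw [List.mem_map]
  constructor
  · rintro ⟨d, hd, heq⟩
    rw [PySem.List.mem_pyRange_one] at hd
    have hd10 : d.toNat < 10 := by omega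
    have := digitChar_inj d.toNat v hd10 hv heq
    omega
  · intro hvK
    refine ⟨(v : Int), ?_, by simp⟩
    rw [PySem.List.mem_pyRange_one]
    omega

-- rewriting B's hit list through the symbol chars
theorem map_find_wanted (base : List Char) (W : List Int) (hW : ∀ d ∈ W, 0 ≤ d ∧ d < 10) :
    W.map (fun d => PySem.Chars.find base (PySem.Int.toChars d))
      = (W.map (fun d => Nat.digitChar d.toNat)).map (fun a => PySem.Chars.find base [a]) := by
  rw [List.map_map]
  apply List.map_congr_left
  intro d hd
  obtain ⟨h0, h9⟩ := hW d hd
  simp [Function.comp, toChars_single d h0 h9]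

-- "".join back from the singleton-string list
theorem flatten_singletons (ds : List Char) :
    (((ds.map (fun c => String.ofList [c])).map String.toList).flatten) = ds := by
  induction ds with
  | nil => rfl
  | cons c rest ih =>
    simp only [List.map_map] at ih ⊢
    simpa using ih

-- flattening the list-of-strings after the insert
theorem flatten_insert (ds : List Char) (ks : String) (f : Nat) :
    ((((ds.map (fun c => String.ofList [c])).take f ++ ks :: (ds.map (fun c => String.ofList [c])).drop f).map String.toList).flatten)
    = ds.take f ++ ks.toList ++ ds.drop f := by
  rw [← List.map_take, ← List.map_drop]
  simp only [List.map_append, List.map_cons, List.flatten_append, List.flatten_cons]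
  rw [flatten_singletons, flatten_singletons]
  simp [List.append_assoc]

-- ===== VERDICT helper: the two ports build the same string =====

theorem solution_eq_alt (N K : Int) (hK : 0 ≤ K) : solution N K = solution_alt N K := by
  by_cases hN : N ≥ 0
  · -- N >= 0
    have hs : PySem.Int.toChars N = Nat.toDigits 10 N.toNat := by
      simp [PySem.Int.toChars, not_lt.mpr hN]
    simp only [solution, solution_alt, if_pos hN, hs]
    set ds := Nat.toDigits 10 N.toNat with hds
    set Q := (PySem.List.pyRange 0 (min K 9 + 1) 1).map (fun d => Nat.digitChar d.toNat) with hQ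
    have hWdig : ∀ d ∈ PySem.List.pyRange 0 (min K 9 + 1) 1, 0 ≤ d ∧ d < 10 := by
      intro d hd
      rw [PySem.List.mem_pyRange_one] at hd
      omega
    rw [map_find_wanted ds _ hWdig, ← hQ, pvHitsVal ds Q _ rfl]
    set F := List.findIdx (fun c => decide (c ∈ Q)) ds with hF
    have hcongr : List.findIdx (fun c => decide (pvIntOf c ≤ K)) (ds.map (fun c => String.ofList [c])) = F := by
      rw [List.findIdx_map, hF]
      apply findIdx_congr_mem
      intro c hc
      obtain ⟨v, hv, rfl⟩ := toDigits_mem_digitChar _ c hc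
      simp only [Function.comp, pvIntOf_digitChar v hv]
      exact decide_eq_decide.mpr (mem_wanted_pos K hK v hv).symm
    rw [pvLoopPos_findIdx, hcongr]
    have hlen : (ds.map (fun c => String.ofList [c])).length = ds.length := by simp
    have hFle : F ≤ ds.length := hF ▸ List.findIdx_le_length
    have hjcast : (0 : Int) + (F : Int) = ((F : Nat) : Int) := by omega
    rw [hjcast, PySem.List.slice_to_natCast, PySem.List.slice_from_natCast]
    by_cases hlt : F < ds.length
    · rw [if_pos (by omega)]
      rw [flatten_insert, PySem.Int.toList_toStr]
    · rw [if_neg (by omega)]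
      have hFL : F = ds.length := by omega
      have h1 : ((((ds.map (fun c => String.ofList [c])) ++ [PySem.Int.toStr K]).map String.toList).flatten)
          = ds ++ (PySem.Int.toChars K) := by
        simp only [List.map_append, List.flatten_append, List.map_cons, List.map_nil,
          List.flatten_cons, List.flatten_nil]
        rw [flatten_singletons, PySem.Int.toList_toStr]
        simp
      rw [h1, hFL]
      simp
  · -- N < 0
    have hlt0 : N < 0 := lt_of_not_ge hN
    have hs : PySem.Int.toChars N = '-' :: Nat.toDigits 10 N.natAbs := by
      simp [PySem.Int.toChars, hlt0]
    simp only [solution, solution_alt, if_neg hN, hs]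
    rw [PySem.List.slice_from_one]
    simp only [List.map_cons, List.tail_cons]
    set ds := Nat.toDigits 10 N.natAbs with hds
    set Q := (PySem.List.pyRange (K + 1) 10 1).map (fun d => Nat.digitChar d.toNat) with hQ
    have hWdig : ∀ d ∈ PySem.List.pyRange (K + 1) 10 1, 0 ≤ d ∧ d < 10 := by
      intro d hd
      rw [PySem.List.mem_pyRange_one] at hd
      omega
    rw [map_find_wanted ds _ hWdig, ← hQ, pvHitsVal ds Q _ rfl]
    set F := List.findIdx (fun c => decide (c ∈ Q)) ds with hF
    have hcongr : List.findIdx (fun c => decide (pvIntOf c > K)) (ds.map (fun c => String.ofList [c])) = F := by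
      rw [List.findIdx_map, hF]
      apply findIdx_congr_mem
      intro c hc
      obtain ⟨v, hv, rfl⟩ := toDigits_mem_digitChar _ c hc
      simp only [Function.comp, pvIntOf_digitChar v hv]
      exact decide_eq_decide.mpr (mem_wanted_neg K v hv).symm
    rw [pvLoopNeg_findIdx, hcongr]
    have hFle : F ≤ ds.length := hF ▸ List.findIdx_le_length
    have hjcast : (1 : Int) + (F : Int) = (((F + 1 : Nat)) : Int) := by omega
    rw [hjcast, PySem.List.slice_to_natCast, PySem.List.slice_from_natCast]
    rw [List.take_succ_cons, List.drop_succ_cons]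
    by_cases hlt : F < ds.length
    · rw [if_pos (by simpa using hlt)]
      simp only [List.map_cons, List.flatten_cons]
      rw [flatten_insert, PySem.Int.toList_toStr]
      simp [List.append_assoc]
    · rw [if_neg (by simpa using hlt)]
      have hFL : F = ds.length := by omega
      have h1 : (((((fun c => String.ofList [c]) '-' :: ds.map (fun c => String.ofList [c])) ++ [PySem.Int.toStr K]).map String.toList).flatten)
          = '-' :: ds ++ (PySem.Int.toChars K) := by
        simp only [List.map_append, List.flatten_append, List.map_cons, List.map_nil,
          List.flatten_cons, List.flatten_nil]
        rw [flatten_singletons, PySem.Int.toList_toStr]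
        simp
      rw [h1, hFL]
      simp

-- ===== VERDICT (by name: the statement is the Claim_ definition above) =====
theorem solution_spec : Claim_equal_solution := by
  intro N K _ hpre
  unfold Spec_solution
  exact solution_eq_alt N K hpre
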